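-- pv_equiv track=rewrite | github.com/sallyklpoon/leetcode-carnival | LeetCode/Easy/2124_As_before_Bs/2124_As_before_Bs.py | check_string_v1
-- ===== SOURCE A (Python) =====
-- def check_string_v1(s: str) -> bool:
--     flag = False
--     for letter in s:
--         if not flag and letter == 'b':
--             flag = True
--         if flag and letter == 'a':
--             return False
--     return True
-- ===== SOURCE B (Python) =====
-- def check_string_v1(s: str) -> bool:
--     i = s.find('b')
--     if i == -1:
--         return True
--     return 'a' not in s[i:]
-- ===== Notes on version B (the rewrite author's own statement) =====
-- stated objective: idiomatic
-- what changed: Replaces the manual flag-driven character loop by locating the first b via str.find and then testing a-membership in the suffix slice.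
import Mathlib
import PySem

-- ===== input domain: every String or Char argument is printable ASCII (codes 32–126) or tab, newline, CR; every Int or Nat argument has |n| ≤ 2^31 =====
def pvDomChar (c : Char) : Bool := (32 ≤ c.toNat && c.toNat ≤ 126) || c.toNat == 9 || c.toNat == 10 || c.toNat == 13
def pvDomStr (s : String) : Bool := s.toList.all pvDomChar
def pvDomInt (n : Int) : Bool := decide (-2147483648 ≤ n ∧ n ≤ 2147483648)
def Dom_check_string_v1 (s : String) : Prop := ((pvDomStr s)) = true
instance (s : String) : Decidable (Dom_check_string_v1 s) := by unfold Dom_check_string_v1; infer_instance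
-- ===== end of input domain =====

-- B replaces A's flag-driven character loop with str.find for the first b plus a membership test on the suffix (idiomatic).

-- ===== PORT A =====
-- flag-driven loop over the characters, with early return False
def checkGoA : Bool → List Char → Bool
  | _, [] => true
  | flag, c :: rest =>
    let flag' := if !flag && c == 'b' then true else flag
    if flag' && c == 'a' then false else checkGoA flag' rest

def check_string_v1 (s : String) : Bool := checkGoA false s.toList

-- ===== PORT B =====
def check_string_v1_alt (s : String) : Bool :=
  let i := PySem.Str.find s "b"
  if i == -1 then true
  else !(PySem.Str.isIn "a" (PySem.Str.slice s (some i) none))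

-- ===== PRECONDITION & SPEC =====
def Spec_check_string_v1 (s : String) (out : Bool) : Prop := out = check_string_v1_alt s
instance (s : String) (out : Bool) : Decidable (Spec_check_string_v1 s out) := by unfold Spec_check_string_v1; infer_instance

-- ===== CLAIM (what is proved, stated in full; the proofs are below) =====
def Claim_equal_check_string_v1 : Prop := ∀ (s : String), Dom_check_string_v1 s → Spec_check_string_v1 s (check_string_v1 s)

-- ===== LEMMAS AND PROOFS =====

-- with the flag set, A just scans for an 'a'
theorem checkGoA_true (l : List Char) : checkGoA true l = !l.contains 'a' := by
  induction l with
  | nil => simp [checkGoA]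
  | cons c rest ih =>
    rw [show checkGoA true (c :: rest) = (if c == 'a' then false else checkGoA true rest) from rfl]
    by_cases h : c = 'a'
    · simp [h]
    · simp [beq_false_of_ne h, ih, Ne.symm h]

-- with the flag clear, a non-'b' character is skipped
theorem checkGoA_false_cons (c : Char) (l : List Char) (h : c ≠ 'b') :
    checkGoA false (c :: l) = checkGoA false l := by
  simp [checkGoA, h]

theorem checkGoA_false_no_b (l : List Char) (h : 'b' ∉ l) : checkGoA false l = true := by
  induction l with
  | nil => rfl
  | cons c rest ih =>
    rw [checkGoA_false_cons c rest (by intro hc; exact h (hc ▸ List.mem_cons_self))]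
    exact ih (fun hm => h (List.mem_cons_of_mem _ hm))

theorem singleton_infix_iff (a : Char) (l : List Char) : [a] <:+: l ↔ a ∈ l := by
  constructor
  · intro h; exact h.mem List.mem_cons_self
  · intro h
    obtain ⟨pre, suf, rfl⟩ := List.append_of_mem h
    exact ⟨pre, suf, by simp⟩

theorem check_chars_eq (l : List Char) :
    checkGoA false l =
      (let i := PySem.Chars.find l ['b']
       if i == -1 then true
       else !(PySem.Chars.isIn ['a'] (PySem.List.slice l (some i) none))) := by
  by_cases hb : PySem.Chars.find l ['b'] = -1
  · have hnb : 'b' ∉ l := by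
      have := (PySem.Chars.find_eq_neg_one_iff (s := l) (sub := ['b'])).mp hb
      rw [singleton_infix_iff] at this; exact this
    simp [hb, checkGoA_false_no_b l hnb]
  · have hpos : 0 ≤ PySem.Chars.find l ['b'] := by
      have := PySem.Chars.neg_one_le_find (s := l) (sub := ['b'])
      omega
    obtain ⟨hpre, hmin⟩ := PySem.Chars.find_spec (s := l) (sub := ['b']) hpos
    set n := (PySem.Chars.find l ['b']).toNat with hn
    obtain ⟨t, ht⟩ := hpre
    -- 'b' does not occur before index n
    have hnotake : 'b' ∉ l.take n := by
      intro hm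
      obtain ⟨j, hj, hget⟩ := List.getElem_of_mem hm
      have hjn : j < n := lt_of_lt_of_le hj (by simp)
      have hjl : j < l.length := lt_of_lt_of_le hjn (by
        have := PySem.Chars.find_le_length (s := l) (sub := ['b'])
        omega)
      apply hmin j hjn
      refine ⟨l.drop (j + 1), ?_⟩
      have : l[j] = 'b' := by
        have := List.getElem_take (xs := l) (h := hj)
        rw [hget] at this; exact this.symm
      rw [← this]
      simpa using (List.getElem_cons_drop (l := l) (i := j) hjl)
    have hsplit : l = l.take n ++ 'b' :: t := by
      conv_lhs => rw [← List.take_append_drop n l, ← ht]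
      simp
    have hslice : PySem.List.slice l (some (PySem.Chars.find l ['b'])) none = 'b' :: t := by
      rw [PySem.List.slice_from (ha := hpos), ← hn, ← ht]; rfl
    have hA : checkGoA false l = !t.contains 'a' := by
      rw [hsplit]
      have hskip : ∀ pre : List Char, 'b' ∉ pre →
          checkGoA false (pre ++ 'b' :: t) = checkGoA false ('b' :: t) := by
        intro pre hp
        induction pre with
        | nil => rfl
        | cons c r ih =>
          rw [List.cons_append,
            checkGoA_false_cons c _ (by intro hc; exact hp (hc ▸ List.mem_cons_self)),
            ih (fun hm => hp (List.mem_cons_of_mem _ hm))]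
      rw [hskip _ hnotake]
      simp [checkGoA, checkGoA_true]
    have hisin : PySem.Chars.isIn ['a'] ('b' :: t) = t.contains 'a' := by
      by_cases ha : 'a' ∈ t
      · rw [(PySem.Chars.isIn_iff_infix (sub := ['a']) (s := 'b' :: t)).mpr
          ((singleton_infix_iff _ _).mpr (List.mem_cons_of_mem _ ha))]
        simp [ha]
      · rw [(PySem.Chars.isIn_eq_false_iff (sub := ['a']) (s := 'b' :: t)).mpr (by
          rw [singleton_infix_iff]; simp [ha])]
        simp [ha]
    simp only [hb, if_false, beq_iff_eq, hslice, hisin, hA]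

theorem alt_eq_chars (s : String) :
    check_string_v1_alt s =
      (let i := PySem.Chars.find s.toList ['b']
       if i == -1 then true
       else !(PySem.Chars.isIn ['a'] (PySem.List.slice s.toList (some i) none))) := by
  simp [check_string_v1_alt, PySem.Str.find, PySem.Str.isIn, PySem.Str.slice]

-- ===== VERDICT (by name: the statement is the Claim_ definition above) =====
theorem check_string_v1_spec : Claim_equal_check_string_v1 := by
  intro s _
  show check_string_v1 s = check_string_v1_alt s
  rw [check_string_v1, check_chars_eq, alt_eq_chars]
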